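-- pv_equiv track=rewrite | github.com/xiaoyang-sde/knowledge-base | docs/computer-science/online-judge/duolingo/valid-data-structure.py | get_valid_data_structure
-- ===== SOURCE A (Python) =====
-- from collections import deque
-- from heapq import heappush, heappop
--
-- class Stack:
--   def __init__(self):
--     self.valid = True
--     self.stack = []
--
--   def push(self, val):
--     self.stack.append(val)
--
--   def pop(self, val):
--     if not self.stack:
--       return
--     real_val = self.stack.pop()
--     if real_val != val:
--       self.valid = False
--
-- class Queue:
--   def __init__(self):
--     self.valid = True
--     self.queue = deque()
--     self.visited = set()
--     self.clear = False
--
--   def push(self, val):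
--     self.queue.append(val)
--     self.visited.add(val)
--
--   def pop(self, val):
--     if not self.queue:
--       return
--     if val in self.visited:
--       self.clear = True
--     if self.clear:
--       real_val = self.queue.popleft()
--       if real_val != val:
--         self.valid = False
--
-- class PriorityQueue:
--   def __init__(self):
--     self.valid = True
--     self.heap = []
--     self.visited = set()
--
--   def push(self, val):
--     self.visited.add(val)
--     heappush(self.heap, val)
--
--   def pop(self, val):
--     if val not in self.visited:
--       if val >= self.heap[0]:
--         self.valid = False
--       return
--
--     self.visited.remove(val)
--     real_val = heappop(self.heap)
--     if real_val != val:
--       self.valid = False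
--
-- def get_valid_data_structure(operations):
--   data_structures = {
--     'stack': Stack(),
--     'queue': Queue(),
--     'priority_queue': PriorityQueue(),
--   }
--   for operation, val in operations:
--     for name, data_structure in data_structures.items():
--       if not data_structure:
--         continue
--       if operation == 'push':
--         data_structure.push(val)
--       elif operation == 'pop':
--         data_structure.pop(val)
--
--       if data_structure.valid == False:
--         data_structures[name] = None
--
--   return [key for key in data_structures.keys() if data_structures[key]]
-- ===== SOURCE B (Python) =====
-- def _stack_valid(operations):
--     # Stack simulated on a write-once append buffer with an explicit stack
--     # pointer: nothing is ever removed, pops just move the pointer down.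
--     buf = []
--     sp = 0
--     for op, val in operations:
--         if op == 'push':
--             if sp < len(buf):
--                 buf[sp] = val
--             else:
--                 buf.append(val)
--             sp += 1
--         elif op == 'pop':
--             if sp:
--                 sp -= 1
--                 if buf[sp] != val:
--                     return False
--     return True
--
--
-- def _queue_valid(operations):
--     # FIFO queue as the immutable list of all pushes plus a front index:
--     # no deque, dequeuing is index arithmetic.
--     pushed = []
--     front = 0
--     seen = set()
--     clear = False
--     for op, val in operations:
--         if op == 'push':
--             pushed.append(val)
--             seen.add(val)
--         elif op == 'pop':
--             if front == len(pushed):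
--                 continue
--             if val in seen:
--                 clear = True
--             if clear:
--                 if pushed[front] != val:
--                     return False
--                 front += 1
--     return True
--
--
-- def _priority_queue_valid(operations):
--     # Priority queue as an unsorted bag with a linear min() scan instead of a
--     # binary heap; min() raises on an empty bag just as heap[0] does in A.
--     live = []
--     visited = set()
--     for op, val in operations:
--         if op == 'push':
--             visited.add(val)
--             live.append(val)
--         elif op == 'pop':
--             if val not in visited:
--                 if val >= min(live):
--                     return False
--             else:
--                 visited.remove(val)
--                 smallest = min(live)
--                 live.remove(smallest)
--                 if smallest != val:
--                     return False
--     return True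
--
--
-- def get_valid_data_structure(operations):
--     result = []
--     if _stack_valid(operations):
--         result.append('stack')
--     if _queue_valid(operations):
--         result.append('queue')
--     if _priority_queue_valid(operations):
--         result.append('priority_queue')
--     return result
-- ===== Notes on version B (the rewrite author's own statement) =====
-- stated objective: alternative
-- what changed: B drops A's data structures entirely: the stack becomes an append-only buffer with an explicit stack pointer (pops never shrink the list), the deque becomes the immutable list of all pushes plus a front index, and the binary heap becomes an unsorted bag whose minimum is found by a linear min() scan, each checked in its own early-returning pass.
-- outside the precondition, e.g. on get_valid_data_structure([('push', 1), ('pop', 2), ('pop', 2)]): A returns ['queue'], B returns ['queue']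
import Mathlib
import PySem

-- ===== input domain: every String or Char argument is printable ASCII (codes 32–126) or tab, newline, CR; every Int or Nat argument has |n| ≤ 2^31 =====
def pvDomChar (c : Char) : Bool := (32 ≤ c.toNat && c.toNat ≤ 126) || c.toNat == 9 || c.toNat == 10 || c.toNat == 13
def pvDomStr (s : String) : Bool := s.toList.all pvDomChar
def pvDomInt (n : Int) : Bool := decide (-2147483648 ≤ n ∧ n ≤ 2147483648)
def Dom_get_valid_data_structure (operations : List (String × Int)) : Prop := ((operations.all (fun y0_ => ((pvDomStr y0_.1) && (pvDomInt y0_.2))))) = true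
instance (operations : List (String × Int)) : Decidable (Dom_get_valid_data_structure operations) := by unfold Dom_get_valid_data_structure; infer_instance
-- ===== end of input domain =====

-- B replaces A's heap/deque machinery: the stack becomes an append-only buffer with a
-- stack pointer, the queue an immutable push list with a front index, and the priority
-- queue an unsorted bag with a linear min scan (objective: alternative, same O over these ops).

-- ===== PORT A =====

-- heapq model: the heap list is kept sorted ascending, so heap[0] and heappop read the
-- head; exact because A only observes the minimum, membership and emptiness.
def pvHeapInsert (v : Int) : List Int → List Int
  | [] => [v]
  | h :: t => if v < h then v :: h :: t else h :: pvHeapInsert v t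

-- Stack state: list of values, top first (Python appends/pops at the end).
-- `none` = the object was replaced by None after data_structure.valid became False.
def pvStepStack (s : Option (List Int)) (op : String) (v : Int) : Option (List Int) :=
  match s with
  | none => none                                  -- `if not data_structure: continue`
  | some st =>
    if op = "push" then some (v :: st)
    else if op = "pop" then
      match st with
      | [] => some []                             -- `if not self.stack: return`
      | r :: rest => if r ≠ v then none else some rest
    else some st

-- Queue state: (queue front-first, visited, clear latch).
def pvStepQueue (q : Option (List Int × PySem.Set Int × Bool)) (op : String) (v : Int) :
    Option (List Int × PySem.Set Int × Bool) :=
  match q with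
  | none => none
  | some (qs, vis, clear) =>
    if op = "push" then some (qs ++ [v], PySem.Set.add vis v, clear)
    else if op = "pop" then
      match qs with
      | [] => some ([], vis, clear)               -- `if not self.queue: return`
      | r :: rest =>
        let clear' := clear || PySem.Set.contains vis v
        if clear' then (if r ≠ v then none else some (rest, vis, clear'))
        else some (r :: rest, vis, clear')
    else some (qs, vis, clear)

-- PriorityQueue state: (heap kept sorted ascending, visited).
def pvStepPQ (p : Option (List Int × PySem.Set Int)) (op : String) (v : Int) :
    Option (List Int × PySem.Set Int) :=
  match p with
  | none => none
  | some (heap, vis) =>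
    if op = "push" then some (pvHeapInsert v heap, PySem.Set.add vis v)
    else if op = "pop" then
      if PySem.Set.contains vis v then
        match heap with
        | [] => some ([], PySem.Set.discard vis v)  -- unreachable in Python (|heap| ≥ |visited|)
        | h :: rest => if h ≠ v then none else some (rest, PySem.Set.discard vis v)
      else
        match heap with
        | [] => some ([], vis)                    -- Python raises IndexError on heap[0]; outside Pre_
        | h :: _ => if v ≥ h then none else some (heap, vis)
    else some (heap, vis)

-- the per-operation loop over the dict {stack, queue, priority_queue} (fixed keys, insertion order)
def pvRunA (ops : List (String × Int))
    (st : Option (List Int) × Option (List Int × PySem.Set Int × Bool) × Option (List Int × PySem.Set Int)) :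
    Option (List Int) × Option (List Int × PySem.Set Int × Bool) × Option (List Int × PySem.Set Int) :=
  match ops with
  | [] => st
  | (op, v) :: rest =>
    pvRunA rest (pvStepStack st.1 op v, pvStepQueue st.2.1 op v, pvStepPQ st.2.2 op v)

def get_valid_data_structure (operations : List (String × Int)) : List String :=
  let fin := pvRunA operations (some [], some ([], PySem.Set.empty, false), some ([], PySem.Set.empty))
  (if fin.1.isSome then ["stack"] else []) ++
  (if fin.2.1.isSome then ["queue"] else []) ++
  (if fin.2.2.isSome then ["priority_queue"] else [])

-- ===== PORT B =====

-- _stack_valid: append-only buffer `buf` plus stack pointer `sp`; a pop only moves sp.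
def pvStackOk (buf : List Int) (sp : Nat) : List (String × Int) → Bool
  | [] => true
  | (op, v) :: rest =>
    if op = "push" then
      if sp < buf.length then pvStackOk (buf.set sp v) (sp + 1) rest
      else pvStackOk (buf ++ [v]) (sp + 1) rest
    else if op = "pop" then
      match sp with
      | 0 => pvStackOk buf 0 rest                 -- `if sp:` — empty, skip
      | k + 1 => if buf.getD k 0 ≠ v then false else pvStackOk buf k rest
                 -- buf[k]: k < len(buf) always holds here, getD's default is never read
    else pvStackOk buf sp rest

-- _queue_valid: `pushed` collects every push, `front` indexes the current head.
def pvQueueOk (pushed : List Int) (front : Nat) (seen : PySem.Set Int) (clear : Bool) :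
    List (String × Int) → Bool
  | [] => true
  | (op, v) :: rest =>
    if op = "push" then pvQueueOk (pushed ++ [v]) front (PySem.Set.add seen v) clear rest
    else if op = "pop" then
      if front = pushed.length then pvQueueOk pushed front seen clear rest
      else
        let clear' := clear || PySem.Set.contains seen v
        if clear' then
          if pushed.getD front 0 ≠ v then false
            -- pushed[front]: front < len(pushed) here, getD's default is never read
          else pvQueueOk pushed (front + 1) seen clear' rest
        else pvQueueOk pushed front seen clear' rest
    else pvQueueOk pushed front seen clear rest

-- _priority_queue_valid: unsorted bag `live`, min() = PySem.List.min?, list.remove = remove?.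
def pvPQOk (live : List Int) (vis : PySem.Set Int) : List (String × Int) → Bool
  | [] => true
  | (op, v) :: rest =>
    if op = "push" then pvPQOk (live ++ [v]) (PySem.Set.add vis v) rest
    else if op = "pop" then
      if PySem.Set.contains vis v then
        match PySem.List.min? live (fun x => x) with
        | none => pvPQOk live (PySem.Set.discard vis v) rest  -- min([]) raises in Python; outside Pre_
        | some m =>
          if m ≠ v then false
          else pvPQOk ((PySem.List.remove? live m).getD live) (PySem.Set.discard vis v) rest
               -- live.remove(m): m ∈ live here, so remove? is always `some`
      else
        match PySem.List.min? live (fun x => x) with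
        | none => pvPQOk live vis rest            -- min([]) raises ValueError in Python; outside Pre_
        | some m => if v ≥ m then false else pvPQOk live vis rest
    else pvPQOk live vis rest

def get_valid_data_structure_alt (operations : List (String × Int)) : List String :=
  (if pvStackOk [] 0 operations then ["stack"] else []) ++
  (if pvQueueOk [] 0 PySem.Set.empty false operations then ["queue"] else []) ++
  (if pvPQOk [] PySem.Set.empty operations then ["priority_queue"] else [])

-- ===== PRECONDITION & SPEC =====
-- Pre_ excludes inputs with a pop that is neither covered by a strict surplus of earlier
-- pushes nor pops a value pushed earlier and not yet popped: only there can A's PriorityQueue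
-- reach heap[0]/heappop on an empty heap and raise IndexError (B's min()/remove likewise
-- raise there).  This closed-form condition is sound but not exact: on some excluded inputs
-- the priority queue was invalidated before the dangerous pop and A still returns — B returns
-- the identical value there (the equivalence proof below in fact never uses Pre_).
def Pre_get_valid_data_structure (operations : List (String × Int)) : Prop :=
  ∀ i, (h : i < operations.length) → (operations[i]).1 = "pop" →
    ((operations.take i).countP (fun o => o.1 = "pop") <
       (operations.take i).countP (fun o => o.1 = "push"))
    ∨ (((operations.take i).any (fun o => o.1 = "push" && o.2 = (operations[i]).2)) = true
       ∧ ((operations.take i).any (fun o => o.1 = "pop" && o.2 = (operations[i]).2)) = false)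
instance (operations : List (String × Int)) : Decidable (Pre_get_valid_data_structure operations) := by
  unfold Pre_get_valid_data_structure; infer_instance

def pvWitness_get_valid_data_structure : (List (String × Int)) := [("push", 1), ("pop", 1)]

def Spec_get_valid_data_structure (operations : List (String × Int)) (out : List String) : Prop := out = get_valid_data_structure_alt operations
instance (operations : List (String × Int)) (out : List String) : Decidable (Spec_get_valid_data_structure operations out) := by unfold Spec_get_valid_data_structure; infer_instance

-- ===== CLAIM =====
def Claim_equal_get_valid_data_structure : Prop := ∀ (operations : List (String × Int)), Dom_get_valid_data_structure operations → Pre_get_valid_data_structure operations → Spec_get_valid_data_structure operations (get_valid_data_structure operations)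

-- ===== LEMMAS AND PROOFS =====

-- A's per-operation loop updates the three structures independently: project it.
def pvRunS (s : Option (List Int)) : List (String × Int) → Option (List Int)
  | [] => s
  | (op, v) :: rest => pvRunS (pvStepStack s op v) rest

def pvRunQ (q : Option (List Int × PySem.Set Int × Bool)) :
    List (String × Int) → Option (List Int × PySem.Set Int × Bool)
  | [] => q
  | (op, v) :: rest => pvRunQ (pvStepQueue q op v) rest

def pvRunP (p : Option (List Int × PySem.Set Int)) :
    List (String × Int) → Option (List Int × PySem.Set Int)
  | [] => p
  | (op, v) :: rest => pvRunP (pvStepPQ p op v) rest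

theorem pvRunA_proj (ops : List (String × Int)) :
    ∀ s q p, pvRunA ops (s, q, p) = (pvRunS s ops, pvRunQ q ops, pvRunP p ops) := by
  induction ops with
  | nil => intro s q p; rfl
  | cons hd rest ih =>
    intro s q p
    simp only [pvRunA, pvRunS, pvRunQ, pvRunP]
    exact ih _ _ _

theorem pvRunS_none (ops : List (String × Int)) : pvRunS none ops = none := by
  induction ops with
  | nil => rfl
  | cons hd rest ih => simpa [pvRunS, pvStepStack] using ih

theorem pvRunQ_none (ops : List (String × Int)) : pvRunQ none ops = none := by
  induction ops with
  | nil => rfl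
  | cons hd rest ih => simpa [pvRunQ, pvStepQueue] using ih

theorem pvRunP_none (ops : List (String × Int)) : pvRunP none ops = none := by
  induction ops with
  | nil => rfl
  | cons hd rest ih => simpa [pvRunP, pvStepPQ] using ih

-- Stack: A's stack (top first) is the reversed first `sp` entries of B's buffer.
theorem pvStack_agree (ops : List (String × Int)) :
    ∀ buf sp, sp ≤ buf.length →
      (pvRunS (some ((buf.take sp).reverse)) ops).isSome = pvStackOk buf sp ops := by
  induction ops with
  | nil => intro buf sp _; rfl
  | cons hd rest ih =>
    obtain ⟨op, v⟩ := hd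
    intro buf sp hsp
    by_cases h1 : op = "push"
    · by_cases h2 : sp < buf.length
      · have e : ((buf.set sp v).take (sp + 1)).reverse = v :: (buf.take sp).reverse := by
          rw [List.set_eq_take_cons_drop v h2, List.take_append]
          simp [List.take_take, List.length_take, Nat.le_of_lt h2]
        have ih' := ih (buf.set sp v) (sp + 1) (by simp; omega)
        rw [e] at ih'
        simpa [pvRunS, pvStepStack, pvStackOk, h1, h2] using ih'
      · have hsp' : sp = buf.length := by omega
        have e : ((buf ++ [v]).take (sp + 1)).reverse = v :: (buf.take sp).reverse := by
          subst hsp'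
          rw [List.take_of_length_le (by simp)]
          simp
        have ih' := ih (buf ++ [v]) (sp + 1) (by simp; omega)
        rw [e] at ih'
        simpa [pvRunS, pvStepStack, pvStackOk, h1, h2] using ih'
    · by_cases h2 : op = "pop"
      · match sp, hsp with
        | 0, hsp =>
          simpa [pvRunS, pvStepStack, pvStackOk, h1, h2] using ih buf 0 (by omega)
        | k + 1, hsp =>
          have hk : k < buf.length := by omega
          have e : (buf.take (k + 1)).reverse = buf[k] :: (buf.take k).reverse := by
            rw [List.take_add_one]
            simp [List.getElem?_eq_getElem hk]
          have hd : buf[k]?.getD 0 = buf[k] := by simp [List.getElem?_eq_getElem hk]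
          by_cases hv : buf[k] = v
          · have ih' := ih buf k (by omega)
            simpa [pvRunS, pvStepStack, pvStackOk, h1, h2, e, hd, hv] using ih'
          · simp [pvRunS, pvStepStack, pvStackOk, h2, e, hd, hv, pvRunS_none]
      · simpa [pvRunS, pvStepStack, pvStackOk, h1, h2] using ih buf sp hsp

-- Queue: A's deque is B's push list from index `front` on.
theorem pvQueue_agree (ops : List (String × Int)) :
    ∀ pushed front seen clear, front ≤ pushed.length →
      (pvRunQ (some (pushed.drop front, seen, clear)) ops).isSome =
        pvQueueOk pushed front seen clear ops := by
  induction ops with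
  | nil => intro pushed front seen clear _; rfl
  | cons hd rest ih =>
    obtain ⟨op, v⟩ := hd
    intro pushed front seen clear hf
    by_cases h1 : op = "push"
    · have e : (pushed ++ [v]).drop front = pushed.drop front ++ [v] :=
        List.drop_append_of_le_length hf
      have ih' := ih (pushed ++ [v]) front (PySem.Set.add seen v) clear (by simp; omega)
      rw [e] at ih'
      simpa [pvRunQ, pvStepQueue, pvQueueOk, h1] using ih'
    · by_cases h2 : op = "pop"
      · by_cases h3 : front = pushed.length
        · have e : pushed.drop front = [] := by subst h3; simp
          simpa [pvRunQ, pvStepQueue, pvQueueOk, h1, h2, h3, e] using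
            ih pushed front seen clear hf
        · have hfl : front < pushed.length := by omega
          have e : pushed.drop front = pushed[front] :: pushed.drop (front + 1) :=
            List.drop_eq_getElem_cons hfl
          have hd : pushed[front]?.getD 0 = pushed[front] := by
            simp [List.getElem?_eq_getElem hfl]
          by_cases hc : clear = true ∨ v ∈ seen
          · by_cases hv : pushed[front] = v
            · have ih' := ih pushed (front + 1) seen (clear || PySem.Set.contains seen v) (by omega)
              simp only [pvRunQ, pvStepQueue, pvQueueOk, e]
              simp [h2, h3, hc, hd, hv] at ih' ⊢
              exact ih'
            · simp only [pvRunQ, pvStepQueue, pvQueueOk, e]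
              simp [h2, h3, hc, hd, hv, pvRunQ_none]
          · have ih' := ih pushed front seen (clear || PySem.Set.contains seen v) hf
            simp only [pvRunQ, pvStepQueue, pvQueueOk, e]
            simp [h2, h3, hc] at ih' ⊢
            exact ih'
      · simpa [pvRunQ, pvStepQueue, pvQueueOk, h1, h2] using ih pushed front seen clear hf

theorem pvHeapInsert_perm (v : Int) (l : List Int) : (pvHeapInsert v l).Perm (v :: l) := by
  induction l with
  | nil => simp [pvHeapInsert]
  | cons h t ih =>
    simp only [pvHeapInsert]
    split_ifs with hv
    · exact List.Perm.refl _
    · exact (ih.cons h).trans (List.Perm.swap v h t)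

theorem pvHeapInsert_pairwise (v : Int) (l : List Int) (hs : l.Pairwise (· ≤ ·)) :
    (pvHeapInsert v l).Pairwise (· ≤ ·) := by
  induction l with
  | nil => simp [pvHeapInsert]
  | cons h t ih =>
    rw [List.pairwise_cons] at hs
    simp only [pvHeapInsert]
    split_ifs with hv
    · refine List.pairwise_cons.2 ⟨?_, List.pairwise_cons.2 ⟨hs.1, hs.2⟩⟩
      intro y hy
      rcases List.mem_cons.1 hy with rfl | hy'
      · omega
      · exact le_of_lt (lt_of_lt_of_le hv (hs.1 _ hy'))
    · refine List.pairwise_cons.2 ⟨?_, ih hs.2⟩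
      intro y hy
      have hm : y ∈ v :: t := (pvHeapInsert_perm v t).mem_iff.1 hy
      rcases List.mem_cons.1 hm with rfl | hy'
      · omega
      · exact hs.1 _ hy'

-- Priority queue: A's sorted heap is a permutation of B's unsorted bag.
theorem pvPQ_agree (ops : List (String × Int)) :
    ∀ heap live vis, heap.Pairwise (· ≤ ·) → heap.Perm live →
      (pvRunP (some (heap, vis)) ops).isSome = pvPQOk live vis ops := by
  induction ops with
  | nil => intro heap live vis _ _; rfl
  | cons hd rest ih =>
    obtain ⟨op, v⟩ := hd
    intro heap live vis hs hp
    by_cases h1 : op = "push"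
    · have hp' : (pvHeapInsert v heap).Perm (live ++ [v]) :=
        ((pvHeapInsert_perm v heap).trans (hp.cons v)).trans
          (List.perm_append_singleton v live).symm
      simpa [pvRunP, pvStepPQ, pvPQOk, h1] using
        ih (pvHeapInsert v heap) (live ++ [v]) (PySem.Set.add vis v)
          (pvHeapInsert_pairwise v heap hs) hp'
    · by_cases h2 : op = "pop"
      · match heap, hs, hp with
        | [], hs, hp =>
          have hl : live = [] := hp.symm.eq_nil
          subst hl
          have hm : PySem.List.min? ([] : List Int) (fun x => x) = none :=
            (PySem.List.min?_eq_none_iff _ _).2 rfl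
          by_cases hv : v ∈ vis
          · simpa [pvRunP, pvStepPQ, pvPQOk, h1, h2, hv, hm] using
              ih [] [] (PySem.Set.discard vis v) (by simp) (List.Perm.refl _)
          · simpa [pvRunP, pvStepPQ, pvPQOk, h1, h2, hv, hm] using
              ih [] [] vis (by simp) (List.Perm.refl _)
        | h :: t, hs, hp =>
          have hlive : live ≠ [] := by
            intro hl; subst hl; exact absurd hp.eq_nil (by simp)
          obtain ⟨m, hm⟩ : ∃ m, PySem.List.min? live (fun x => x) = some m := by
            cases hmm : PySem.List.min? live (fun x => x) with
            | none => exact absurd ((PySem.List.min?_eq_none_iff _ _).1 hmm) hlive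
            | some m => exact ⟨m, rfl⟩
          have hmem : m ∈ live := PySem.List.min?_mem hm
          have hmin : ∀ y ∈ live, m ≤ y := PySem.List.min?_isMin hm
          have hmh : m = h := by
            have h1' : m ≤ h := hmin h (hp.mem_iff.1 (List.mem_cons_self ..))
            have h2' : h ≤ m := by
              rcases List.mem_cons.1 (hp.symm.mem_iff.1 hmem) with rfl | hmt
              · exact le_refl _
              · exact (List.pairwise_cons.1 hs).1 m hmt
            omega
          subst hmh
          have herase : t.Perm ((PySem.List.remove? live m).getD live) := by
            rw [PySem.List.remove?_eq_some_erase live m hmem]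
            simpa using (List.Perm.erase m hp)
          by_cases hv : v ∈ vis
          · by_cases hmv : m = v
            · have ih' := ih t ((PySem.List.remove? live m).getD live)
                (PySem.Set.discard vis v) (List.pairwise_cons.1 hs).2 herase
              simpa [pvRunP, pvStepPQ, pvPQOk, h1, h2, hv, hm, hmv] using ih'
            · simp [pvRunP, pvStepPQ, pvPQOk, h2, hv, hm, hmv, pvRunP_none]
          · by_cases hge : v ≥ m
            · simp [pvRunP, pvStepPQ, pvPQOk, h2, hv, hm, hge, pvRunP_none]
            · simpa [pvRunP, pvStepPQ, pvPQOk, h1, h2, hv, hm, hge] using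
                ih (m :: t) live vis hs hp
      · simpa [pvRunP, pvStepPQ, pvPQOk, h1, h2] using ih heap live vis hs hp

-- ===== VERDICT =====
theorem get_valid_data_structure_spec : Claim_equal_get_valid_data_structure := by
  intro operations _ _
  unfold Spec_get_valid_data_structure get_valid_data_structure get_valid_data_structure_alt
  rw [pvRunA_proj]
  have hs := pvStack_agree operations [] 0 (by simp)
  have hq := pvQueue_agree operations [] 0 PySem.Set.empty false (by simp)
  have hp := pvPQ_agree operations [] [] PySem.Set.empty (by simp) (List.Perm.refl _)
  simp only [List.take_nil, List.reverse_nil, List.drop_nil] at hs hq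
  simp only [hs, hq, hp]
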